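-- pv_equiv track=rewrite | github.com/markop404/media-downloader | src/utils/__init__.py | plain_text_to_set
-- ===== SOURCE A (Python) =====
-- def plain_text_to_set(text):
--     lines = set()
--     line = ""
--     for char in text:
--         if char == " " or char == "\t" or char == "\n" and line == "":
--             continue
--         elif char == "\n" and line != "":
--             line.replace(" ", "")
--             lines.add(line)
--             line = ""
--         else:
--             line += char
--     if line:
--         lines.add(line)
--     return lines
-- ===== SOURCE B (Python) =====
-- def plain_text_to_set(text):
--     lines = set()
--     for segment in text.split("\n"):
--         cleaned = "".join(c for c in segment if c != " " and c != "\t")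
--         if cleaned:
--             lines.add(cleaned)
--     return lines
-- ===== Notes on version B (the rewrite author's own statement) =====
-- stated objective: simpler
-- what changed: Replaced the character-by-character accumulator state machine with a split-on-newline pass that cleans each segment (dropping all spaces and tabs) and keeps the non-empty ones.
import Mathlib
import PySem

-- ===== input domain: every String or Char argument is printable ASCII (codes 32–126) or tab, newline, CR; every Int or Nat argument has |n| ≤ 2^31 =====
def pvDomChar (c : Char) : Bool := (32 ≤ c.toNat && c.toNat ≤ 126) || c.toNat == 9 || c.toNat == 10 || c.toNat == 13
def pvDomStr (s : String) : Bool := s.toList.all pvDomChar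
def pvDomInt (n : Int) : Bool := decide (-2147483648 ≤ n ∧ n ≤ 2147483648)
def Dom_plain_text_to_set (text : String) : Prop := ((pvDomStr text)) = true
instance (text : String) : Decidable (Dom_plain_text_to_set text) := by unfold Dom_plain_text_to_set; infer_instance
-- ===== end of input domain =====

-- B replaces A's char-by-char accumulator state machine with split-on-newline then
-- per-segment cleaning (drop every space/tab, keep non-empty segments): simpler, same result.

-- ===== PORT A =====
-- loop body of A's for-char loop; the loop state is (lines, line).
-- (A's `line.replace(" ", "")` discards its result — a no-op — so there is nothing to port for it.)
def pvAStep (st : List String × List Char) (c : Char) : List String × List Char :=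
  if c == ' ' || c == '\t' || (c == '\n' && st.2.isEmpty) then st
  else if c == '\n' && !st.2.isEmpty then (PySem.Set.add st.1 (String.ofList st.2), [])
  else (st.1, st.2 ++ [c])

-- the trailing `if line: lines.add(line)`
def pvAFinish (st : List String × List Char) : List String :=
  if st.2.isEmpty then st.1 else PySem.Set.add st.1 (String.ofList st.2)

def plain_text_to_set (text : String) : List String :=
  pvAFinish (text.toList.foldl pvAStep ([], []))

-- ===== PORT B =====
-- loop body of B's for-segment loop ("".join of the kept chars = filter)
def pvBStep (lines : List String) (segment : List Char) : List String :=
  let cleaned := segment.filter (fun c => c != ' ' && c != '\t')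
  if cleaned.isEmpty then lines else PySem.Set.add lines (String.ofList cleaned)

def plain_text_to_set_alt (text : String) : List String :=
  (PySem.Chars.splitOn text.toList ['\n']).foldl pvBStep []

-- ===== PRECONDITION & SPEC =====
def Spec_plain_text_to_set (text : String) (out : List String) : Prop := out = plain_text_to_set_alt text
instance (text : String) (out : List String) : Decidable (Spec_plain_text_to_set text out) := by unfold Spec_plain_text_to_set; infer_instance

-- ===== CLAIM (what is proved, stated in full; the proofs are below) =====
def Claim_equal_plain_text_to_set : Prop := ∀ (text : String), Dom_plain_text_to_set text → Spec_plain_text_to_set text (plain_text_to_set text)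

-- ===== LEMMAS AND PROOFS =====

-- reference splitter: split `pre ++ cs` on '\n', with `pre` already consumed
def pvMySplit (pre : List Char) : List Char → List (List Char)
  | [] => [pre]
  | c :: rest => if c = '\n' then pre :: pvMySplit [] rest else pvMySplit (pre ++ [c]) rest

def pvClean (cs : List Char) : List Char := cs.filter (fun c => c != ' ' && c != '\t')

lemma pvBStep_def (lines : List String) (seg : List Char) :
    pvBStep lines seg =
      if (pvClean seg).isEmpty then lines else PySem.Set.add lines (String.ofList (pvClean seg)) := rfl

lemma pvGo_eq (fuel : Nat) : ∀ (l cur : List Char) (acc : List (List Char)),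
    l.length ≤ fuel →
    PySem.Chars.splitOn.go ['\n'] fuel l cur acc = acc.reverse ++ pvMySplit cur.reverse l := by
  induction fuel with
  | zero =>
    intro l cur acc h
    have hl : l = [] := List.eq_nil_of_length_eq_zero (Nat.le_zero.mp h)
    subst hl
    simp [PySem.Chars.splitOn.go, pvMySplit]
  | succ fuel ih =>
    intro l cur acc h
    cases l with
    | nil => simp [PySem.Chars.splitOn.go, pvMySplit]
    | cons c rest =>
      rw [PySem.Chars.splitOn.go]
      by_cases hc : c = '\n'
      · subst hc
        have hpre : List.isPrefixOf ['\n'] ('\n' :: rest) = true := by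
          simp [List.isPrefixOf]
        rw [if_pos hpre]
        simp only [List.length_cons] at h
        rw [ih _ _ _ (by simpa using Nat.le_of_succ_le_succ h)]
        simp [pvMySplit]
      · have hpre : List.isPrefixOf ['\n'] (c :: rest) = false := by
          simp [List.isPrefixOf]
          exact fun h => hc h.symm
        rw [if_neg (by simp [hpre])]
        simp only [List.length_cons] at h
        rw [ih _ _ _ (Nat.le_of_succ_le_succ h)]
        simp [pvMySplit, hc]

lemma pvSplitOn_eq (cs : List Char) :
    PySem.Chars.splitOn cs ['\n'] = pvMySplit [] cs := by
  have := pvGo_eq (cs.length + 1) cs [] [] (Nat.le_succ _)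
  simpa [PySem.Chars.splitOn] using this

lemma pvClean_append_one (pre : List Char) (c : Char) :
    pvClean (pre ++ [c]) = pvClean pre ++ (if c != ' ' && c != '\t' then [c] else []) := by
  simp only [pvClean, List.filter_append]
  split_ifs with h <;> simp [List.filter, h]

lemma pvFold (cs : List Char) : ∀ (lines : List String) (pre : List Char),
    pvAFinish (cs.foldl pvAStep (lines, pvClean pre)) =
      (pvMySplit pre cs).foldl pvBStep lines := by
  induction cs with
  | nil =>
    intro lines pre
    simp only [List.foldl_nil, pvMySplit, List.foldl_cons]
    rw [pvBStep_def]
    rfl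
  | cons c cs ih =>
    intro lines pre
    rw [List.foldl_cons]
    by_cases hsp : c = ' ' ∨ c = '\t'
    · have hstep : pvAStep (lines, pvClean pre) c = (lines, pvClean pre) := by
        rcases hsp with h | h <;> subst h <;> simp [pvAStep]
      have hcl : pvClean (pre ++ [c]) = pvClean pre := by
        rw [pvClean_append_one]
        rcases hsp with h | h <;> subst h <;> simp
      have hnl : c ≠ '\n' := by rcases hsp with h | h <;> subst h <;> decide
      rw [hstep, ← hcl, ih lines (pre ++ [c]), pvMySplit, if_neg hnl]
    · rw [not_or] at hsp
      by_cases hnl : c = '\n'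
      · subst hnl
        have hstep : pvAStep (lines, pvClean pre) '\n' = (pvBStep lines pre, []) := by
          by_cases he : (pvClean pre).isEmpty
          · have h0 : pvClean pre = [] := List.isEmpty_iff.mp he
            rw [pvBStep_def, if_pos he, h0]
            simp [pvAStep]
          · rw [pvBStep_def, if_neg he]
            simp only [Bool.not_eq_true] at he
            simp [pvAStep, he]
        rw [hstep]
        have hms : pvMySplit pre ('\n' :: cs) = pre :: pvMySplit [] cs := by
          rw [pvMySplit, if_pos rfl]
        rw [hms, List.foldl_cons]
        exact ih (pvBStep lines pre) []
      · have hstep : pvAStep (lines, pvClean pre) c = (lines, pvClean pre ++ [c]) := by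
          simp [pvAStep, hsp.1, hsp.2, hnl]
        have hcl : pvClean (pre ++ [c]) = pvClean pre ++ [c] := by
          rw [pvClean_append_one]
          simp [hsp.1, hsp.2]
        rw [hstep, ← hcl, ih lines (pre ++ [c]), pvMySplit, if_neg hnl]

-- ===== VERDICT (by name: the statement is the Claim_ definition above) =====
theorem plain_text_to_set_spec : Claim_equal_plain_text_to_set := by
  intro text _
  unfold Spec_plain_text_to_set plain_text_to_set plain_text_to_set_alt
  rw [pvSplitOn_eq]
  exact pvFold text.toList [] []
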